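-- pv_equiv track=rewrite | github.com/kons-ole/yandex | algo5/week 3/C.py | min_deletions_to_make_near_equal
-- ===== SOURCE A (Python) =====
-- def min_deletions_to_make_near_equal(a):
--     a.sort()
--     max_length = 0
--     left = 0
--
--     for right in range(len(a)):
--         while a[right] - a[left] > 1:
--             left += 1
--         max_length = max(max_length, right - left + 1)
--
--     return len(a) - max_length
-- ===== SOURCE B (Python) =====
-- import bisect
--
-- def min_deletions_to_make_near_equal(a):
--     a.sort()
--     max_length = 0
--     for right in range(len(a)):
--         left = bisect.bisect_left(a, a[right] - 1)
--         max_length = max(max_length, right - left + 1)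
--     return len(a) - max_length
-- ===== Notes on version B (the rewrite author's own statement) =====
-- stated objective: alternative
-- what changed: Replaced the amortized sliding left-pointer (inner while loop carrying 'left' across iterations) with an independent binary search (bisect_left for a[right]-1) per element over the sorted array.
import Mathlib
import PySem

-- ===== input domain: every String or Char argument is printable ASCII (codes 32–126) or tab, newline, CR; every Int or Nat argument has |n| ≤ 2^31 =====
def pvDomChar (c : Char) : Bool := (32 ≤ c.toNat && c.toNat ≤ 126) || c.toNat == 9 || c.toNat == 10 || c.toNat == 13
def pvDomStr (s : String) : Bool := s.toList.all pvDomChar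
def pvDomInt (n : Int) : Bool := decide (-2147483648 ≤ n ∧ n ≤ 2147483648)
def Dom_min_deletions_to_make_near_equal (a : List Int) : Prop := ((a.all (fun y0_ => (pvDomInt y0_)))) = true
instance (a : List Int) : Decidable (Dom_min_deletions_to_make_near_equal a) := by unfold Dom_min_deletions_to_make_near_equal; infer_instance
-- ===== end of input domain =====

-- B replaces A's amortized sliding left-pointer with an independent bisect_left per element
-- (alternative algorithm, same asymptotic cost). Both programs sort the argument in place
-- (identical mutation); the equivalence proved here is about the return value.


-- ===== PORT A =====
-- inner 'while a[right] - a[left] > 1: left += 1'; fuel = len(a) always suffices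
-- (left never passes right), so this is exact.
def pvWhileA (s : List Int) (r : Nat) (left : Nat) (fuel : Nat) : Nat :=
  match fuel with
  | 0 => left
  | f + 1 =>
    if PySem.List.pyGetD s (r : Int) 0 - PySem.List.pyGetD s (left : Int) 0 > 1 then
      pvWhileA s r (left + 1) f
    else left

-- the 'for right in range(len(a))' loop over the sorted list, state (max_length, left)
def pvFoldA (s : List Int) : Int × Nat :=
  (List.range s.length).foldl
    (fun (st : Int × Nat) (r : Nat) =>
      let left := pvWhileA s r st.2 s.length
      (max st.1 ((r : Int) - (left : Int) + 1), left))
    (0, 0)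

def min_deletions_to_make_near_equal (a : List Int) : Int :=
  ((PySem.List.sorted a (fun x => x) false).length : Int) -
    (pvFoldA (PySem.List.sorted a (fun x => x) false)).1

-- ===== PORT B =====
-- per-element 'left = bisect.bisect_left(a, a[right] - 1)' over the sorted list
def pvFoldB (s : List Int) : Int :=
  (List.range s.length).foldl
    (fun (m : Int) (r : Nat) =>
      let left := PySem.List.bisectLeft s (PySem.List.pyGetD s (r : Int) 0 - 1)
      max m ((r : Int) - (left : Int) + 1))
    0

def min_deletions_to_make_near_equal_alt (a : List Int) : Int :=
  ((PySem.List.sorted a (fun x => x) false).length : Int) -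
    pvFoldB (PySem.List.sorted a (fun x => x) false)

-- ===== PRECONDITION & SPEC =====
def Spec_min_deletions_to_make_near_equal (a : List Int) (out : Int) : Prop := out = min_deletions_to_make_near_equal_alt a
instance (a : List Int) (out : Int) : Decidable (Spec_min_deletions_to_make_near_equal a out) := by unfold Spec_min_deletions_to_make_near_equal; infer_instance

-- ===== CLAIM (what is proved, stated in full; the proofs are below) =====
def Claim_equal_min_deletions_to_make_near_equal : Prop := ∀ (a : List Int), Dom_min_deletions_to_make_near_equal a → Spec_min_deletions_to_make_near_equal a (min_deletions_to_make_near_equal a)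

-- ===== LEMMAS AND PROOFS =====

-- bisectLeft is monotone in the needle on a sorted list
theorem pv_bisect_mono (s : List Int) (hs : s.Pairwise (· ≤ ·)) {x y : Int} (hxy : x ≤ y) :
    PySem.List.bisectLeft s x ≤ PySem.List.bisectLeft s y := by
  obtain ⟨hlx, hltx, hgex⟩ := PySem.List.bisectLeft_spec s x hs
  obtain ⟨hly, hlty, hgey⟩ := PySem.List.bisectLeft_spec s y hs
  by_contra h
  push Not at h
  have hj : PySem.List.bisectLeft s y < s.length := lt_of_lt_of_le h hlx
  have h1 := hltx _ hj h
  have h2 := hgey _ hj (le_refl _)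
  omega

-- bisectLeft s (s[r]-1) never passes r
theorem pv_bisect_le_r (s : List Int) (hs : s.Pairwise (· ≤ ·)) (r : Nat) (hr : r < s.length) :
    PySem.List.bisectLeft s (s[r] - 1) ≤ r := by
  obtain ⟨hl, hlt, _⟩ := PySem.List.bisectLeft_spec s (s[r] - 1) hs
  by_contra h
  push Not at h
  have := hlt r hr h
  omega

-- the while loop lands exactly on bisectLeft s (s[r]-1)
theorem pv_while_eq (s : List Int) (hs : s.Pairwise (· ≤ ·)) (r : Nat) (hr : r < s.length) :
    ∀ (fuel ℓ : Nat), ℓ ≤ PySem.List.bisectLeft s (s[r] - 1) →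
      PySem.List.bisectLeft s (s[r] - 1) - ℓ ≤ fuel →
      pvWhileA s r ℓ fuel = PySem.List.bisectLeft s (s[r] - 1) := by
  obtain ⟨hl, hlt, hge⟩ := PySem.List.bisectLeft_spec s (s[r] - 1) hs
  intro fuel
  induction fuel with
  | zero => intro ℓ h1 h2; simp [pvWhileA]; omega
  | succ f ih =>
    intro ℓ h1 h2
    have hB := pv_bisect_le_r s hs r hr
    rcases lt_or_eq_of_le h1 with hlt' | heq
    · have hℓr : ℓ < s.length := by omega
      have hcond : s[r] - s[ℓ] > 1 := by
        have := hlt ℓ hℓr hlt'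
        omega
      simp only [pvWhileA, PySem.List.pyGetD_natCast, List.getD_eq_getElem?_getD,
        List.getElem?_eq_getElem hr, List.getElem?_eq_getElem hℓr, Option.getD_some]
      rw [if_pos hcond]
      exact ih (ℓ + 1) (by omega) (by omega)
    · have hℓr : ℓ ≤ r := by omega
      have hℓlen : ℓ < s.length := by omega
      have hcond : ¬ (s[r] - s[ℓ] > 1) := by
        have := hge ℓ hℓlen (by omega)
        omega
      simp only [pvWhileA, PySem.List.pyGetD_natCast, List.getD_eq_getElem?_getD,
        List.getElem?_eq_getElem hr, List.getElem?_eq_getElem hℓlen, Option.getD_some]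
      rw [if_neg hcond]
      omega

-- B's needle at index r, with pyGetD unfolded
theorem pv_needle_eq (s : List Int) (r : Nat) (hr : r < s.length) :
    PySem.List.pyGetD s (r : Int) 0 - 1 = s[r] - 1 := by
  simp [PySem.List.pyGetD_natCast, List.getD_eq_getElem?_getD, List.getElem?_eq_getElem hr]

-- main invariant: for n ≤ len, A's fold over range n yields (B's fold over range n, L n)
-- where L n is 0 for n = 0 and bisectLeft s (s[n-1]-1) otherwise.
theorem pv_fold_inv (s : List Int) (hs : s.Pairwise (· ≤ ·)) :
    ∀ n, (hn : n ≤ s.length) →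
      (List.range n).foldl
        (fun (st : Int × Nat) (r : Nat) =>
          let left := pvWhileA s r st.2 s.length
          (max st.1 ((r : Int) - (left : Int) + 1), left))
        (0, 0)
      = ((List.range n).foldl
          (fun (m : Int) (r : Nat) =>
            let left := PySem.List.bisectLeft s (PySem.List.pyGetD s (r : Int) 0 - 1)
            max m ((r : Int) - (left : Int) + 1))
          0,
         if h : n = 0 then 0 else PySem.List.bisectLeft s (s[n-1]'(by omega) - 1)) := by
  intro n
  induction n with
  | zero => intro _; simp
  | succ k ih =>
    intro hn
    have hk : k < s.length := by omega
    rw [List.range_succ, List.foldl_append, List.foldl_append, ih (by omega)]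
    simp only [List.foldl_cons, List.foldl_nil]
    have hneedle := pv_needle_eq s k hk
    have hBk := pv_bisect_le_r s hs k hk
    have hstart : (if h : k = 0 then 0 else PySem.List.bisectLeft s (s[k-1]'(by omega) - 1))
        ≤ PySem.List.bisectLeft s (s[k] - 1) := by
      split
      · omega
      · apply pv_bisect_mono s hs
        have : s[k-1]'(by omega) ≤ s[k] := by
          apply List.Pairwise.rel_get_of_le hs
          simp [Fin.le_def]
        omega
    have hwhile := pv_while_eq s hs k hk s.length
      (if h : k = 0 then 0 else PySem.List.bisectLeft s (s[k-1]'(by omega) - 1))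
      hstart (by omega)
    rw [hwhile, hneedle]
    simp

theorem pv_ports_eq (a : List Int) :
    min_deletions_to_make_near_equal a = min_deletions_to_make_near_equal_alt a := by
  unfold min_deletions_to_make_near_equal min_deletions_to_make_near_equal_alt pvFoldA pvFoldB
  have hs : (PySem.List.sorted a (fun x => x) false).Pairwise (· ≤ ·) :=
    PySem.List.sorted_pairwise a (fun x => x)
  rw [pv_fold_inv (PySem.List.sorted a (fun x => x) false) hs _ (le_refl _)]

-- ===== VERDICT (by name: the statement is the Claim_ definition above) =====
theorem min_deletions_to_make_near_equal_spec : Claim_equal_min_deletions_to_make_near_equal := by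
  intro a _
  exact pv_ports_eq a
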